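-- pv_equiv track=rewrite | github.com/jiayingsong2023/litevLLM | vllm/sample/rejection_sampler.py | _combine_outputs_with_spec_tokens
-- ===== SOURCE A (Python) =====
-- def _combine_outputs_with_spec_tokens(
--     output_token_ids: list[list[int]],
--     spec_token_ids: list[list[int]] | None = None,
-- ) -> list[list[int]]:
--     if spec_token_ids is None:
--         return output_token_ids
--
--     result = []
--     for out, spec in zip(output_token_ids, spec_token_ids):
--         if len(spec) == 0:
--             continue
--         result.append(out)
--         for i in range(len(spec) - 1):
--             result.append([*result[-1], spec[i]])
--     return result
-- ===== SOURCE B (Python) =====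
-- def _combine_outputs_with_spec_tokens(
--     output_token_ids: list[list[int]],
--     spec_token_ids: list[list[int]] | None = None,
-- ) -> list[list[int]]:
--     if spec_token_ids is None:
--         return output_token_ids
--
--     def block(cur, spec):
--         # emit cur, then grow it by one spec token at a time
--         if not spec:
--             return []
--         return [cur] + block(cur + [spec[0]], spec[1:])
--
--     def walk(outs, specs):
--         if not outs or not specs:
--             return []
--         return block(outs[0], specs[0]) + walk(outs[1:], specs[1:])
--
--     return walk(output_token_ids, spec_token_ids)
-- ===== Notes on version B (the rewrite author's own statement) =====
-- stated objective: alternative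
-- what changed: Replaced the imperative accumulator loop chained off result[-1] with a structural recursion: a `walk` over the two lists in lockstep and a `block` helper that emits the current list and grows it by consuming one spec token at a time (no zip, no ranges, no indexing).
import Mathlib
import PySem

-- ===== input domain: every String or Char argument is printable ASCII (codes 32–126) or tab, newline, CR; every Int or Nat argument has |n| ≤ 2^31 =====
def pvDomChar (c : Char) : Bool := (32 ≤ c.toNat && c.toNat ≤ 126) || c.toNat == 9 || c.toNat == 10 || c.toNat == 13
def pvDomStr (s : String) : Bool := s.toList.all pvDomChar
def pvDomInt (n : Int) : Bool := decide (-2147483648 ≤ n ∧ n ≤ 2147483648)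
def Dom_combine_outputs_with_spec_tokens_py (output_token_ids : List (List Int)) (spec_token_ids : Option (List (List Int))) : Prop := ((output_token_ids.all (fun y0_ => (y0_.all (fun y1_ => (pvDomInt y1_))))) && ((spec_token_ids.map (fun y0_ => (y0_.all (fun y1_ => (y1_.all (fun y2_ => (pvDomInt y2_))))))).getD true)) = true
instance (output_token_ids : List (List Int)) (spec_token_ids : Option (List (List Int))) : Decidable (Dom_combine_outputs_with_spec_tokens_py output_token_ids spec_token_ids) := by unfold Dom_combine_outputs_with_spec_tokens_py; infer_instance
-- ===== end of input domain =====

-- B replaces A's accumulator loop chained off result[-1] with a structural recursion: `walk`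
-- over the two lists in lockstep, and `block` emitting the current list and growing it by one
-- spec token at a time. Return-value equivalence only: A's result shares the input `out` lists.

-- ===== PORT A =====
-- literal port of A: outer foldl over zip carrying `result`; inner loop over
-- range(len(spec)-1) appending result[-1] + [spec[i]].  spec.getD i 0 is exact
-- here since i < len(spec) always (range bound).
def combine_outputs_with_spec_tokens_py (output_token_ids : List (List Int)) (spec_token_ids : Option (List (List Int))) : List (List Int) :=
  match spec_token_ids with
  | none => output_token_ids
  | some specs =>
    (output_token_ids.zip specs).foldl
      (fun result p =>
        if p.2.length = 0 then result
        else
          (List.range (p.2.length - 1)).foldl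
            (fun r i => r ++ [r.getLastD [] ++ [p.2.getD i 0]])
            (result ++ [p.1]))
      []

-- ===== PORT B =====
-- Source B's `block`: emit cur, then recurse with cur extended by the spec head
def pvBlock (cur : List Int) : List Int → List (List Int)
  | [] => []
  | s :: rest => cur :: pvBlock (cur ++ [s]) rest

-- Source B's `walk`: lockstep recursion over the two lists
def pvWalk : List (List Int) → List (List Int) → List (List Int)
  | [], _ => []
  | _ :: _, [] => []
  | out :: outs, spec :: specs => pvBlock out spec ++ pvWalk outs specs

def combine_outputs_with_spec_tokens_py_alt (output_token_ids : List (List Int)) (spec_token_ids : Option (List (List Int))) : List (List Int) :=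
  match spec_token_ids with
  | none => output_token_ids
  | some specs => pvWalk output_token_ids specs

-- ===== PRECONDITION & SPEC =====
def Spec_combine_outputs_with_spec_tokens_py (output_token_ids : List (List Int)) (spec_token_ids : Option (List (List Int))) (out : List (List Int)) : Prop := out = combine_outputs_with_spec_tokens_py_alt output_token_ids spec_token_ids
instance (output_token_ids : List (List Int)) (spec_token_ids : Option (List (List Int))) (out : List (List Int)) : Decidable (Spec_combine_outputs_with_spec_tokens_py output_token_ids spec_token_ids out) := by unfold Spec_combine_outputs_with_spec_tokens_py; infer_instance

-- ===== CLAIM (what is proved, stated in full; the proofs are below) =====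
def Claim_equal_combine_outputs_with_spec_tokens_py : Prop := ∀ (output_token_ids : List (List Int)) (spec_token_ids : Option (List (List Int))), Dom_combine_outputs_with_spec_tokens_py output_token_ids spec_token_ids → Spec_combine_outputs_with_spec_tokens_py output_token_ids spec_token_ids (combine_outputs_with_spec_tokens_py output_token_ids spec_token_ids)

-- ===== LEMMAS AND PROOFS =====

-- B's block is the list of prefixes cur ++ spec.take i, i < len(spec).
theorem pv_block_eq (spec cur : List Int) :
    pvBlock cur spec = (List.range spec.length).map (fun i => cur ++ spec.take i) := by
  induction spec generalizing cur with
  | nil => simp [pvBlock]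
  | cons s rest ih =>
    simp only [pvBlock, ih, List.length_cons, List.range_succ_eq_map, List.map_cons,
      List.map_map]
    refine List.cons_eq_cons.mpr ⟨by simp, ?_⟩
    apply List.map_congr_left
    intro i _
    simp [List.take_succ_cons, Function.comp]

-- A's inner loop, started from res ++ [out], produces exactly the prefix block.
theorem pv_inner_eq (spec out : List Int) (res : List (List Int)) (j : Nat)
    (hj : j + 1 ≤ spec.length) :
    (List.range j).foldl (fun r i => r ++ [r.getLastD [] ++ [spec.getD i 0]]) (res ++ [out])
      = res ++ (List.range (j + 1)).map (fun i => out ++ spec.take i) := by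
  induction j with
  | zero => simp
  | succ j ih =>
    have hj' : j + 1 ≤ spec.length := by omega
    have hlt : j < spec.length := by omega
    rw [List.range_succ, List.foldl_append, ih hj']
    simp only [List.foldl_cons, List.foldl_nil]
    have hmap : (List.range (j + 1)).map (fun i => out ++ spec.take i)
        = (List.range j).map (fun i => out ++ spec.take i) ++ [out ++ spec.take j] := by
      rw [List.range_succ, List.map_append]; simp
    have hlast : (res ++ (List.range (j + 1)).map (fun i => out ++ spec.take i)).getLastD []
        = out ++ spec.take j := by
      rw [hmap, ← List.append_assoc, List.getLastD_concat]
    have htake : spec.take j ++ [spec.getD j 0] = spec.take (j + 1) := by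
      rw [List.getD_eq_getElem spec 0 hlt, List.take_add_one]
      simp [List.getElem?_eq_getElem hlt]
    rw [hlast, List.range_succ (n := j + 1), List.map_append, hmap]
    simp [← htake]

-- A's outer foldl over the zip equals res ++ B's lockstep walk.
theorem pv_outer_eq (outs specs : List (List Int)) (res : List (List Int)) :
    (outs.zip specs).foldl
      (fun result p =>
        if p.2.length = 0 then result
        else
          (List.range (p.2.length - 1)).foldl
            (fun r i => r ++ [r.getLastD [] ++ [p.2.getD i 0]])
            (result ++ [p.1]))
      res
    = res ++ pvWalk outs specs := by
  induction outs generalizing specs res with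
  | nil => simp [pvWalk]
  | cons out outs ih =>
    cases specs with
    | nil => simp [pvWalk]
    | cons spec specs =>
      simp only [List.zip_cons_cons, List.foldl_cons, pvWalk]
      by_cases h : spec.length = 0
      · rw [if_pos h, ih]
        have : spec = [] := List.eq_nil_of_length_eq_zero h
        simp [this, pvBlock]
      · have hlen : (spec.length - 1) + 1 ≤ spec.length := by omega
        rw [if_neg h, pv_inner_eq spec out res (spec.length - 1) hlen, ih]
        have hj : spec.length - 1 + 1 = spec.length := by omega
        rw [hj, ← pv_block_eq, List.append_assoc]

-- ===== VERDICT (by name: the statement is the Claim_ definition above) =====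
theorem combine_outputs_with_spec_tokens_py_spec : Claim_equal_combine_outputs_with_spec_tokens_py := by
  intro outs specs _
  unfold Spec_combine_outputs_with_spec_tokens_py combine_outputs_with_spec_tokens_py combine_outputs_with_spec_tokens_py_alt
  cases specs with
  | none => rfl
  | some specs => simpa using pv_outer_eq outs specs []
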